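-- pv_equiv track=rewrite | github.com/jgranda1999/agentic-sade | tools/claims_tools.py | _align_incident_resolution
-- ===== SOURCE A (Python) =====
-- from typing import Dict, Any, List
--
-- def _align_incident_resolution(
--     incident_codes: List[str],
--     user_records: List[Dict[str, Any]],
-- ) -> tuple[List[str], List[str]]:
--     """
--     Align incident_codes (hhhh-sss) with user_input records by order (chronological).
--     Returns (resolved_prefixes, unresolved_prefixes) where prefix = hhhh.
--     A prefix is resolved if at least one aligned record has status "Resolved".
--     """
--     resolved_set: set[str] = set()
--     unresolved_list: List[str] = []
--
--     for i, code in enumerate(incident_codes):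
--         if "-" not in code:
--             continue
--         prefix = code.split("-")[0]
--         if i < len(user_records) and user_records[i].get("status") == "Resolved":
--             resolved_set.add(prefix)
--         else:
--             unresolved_list.append(prefix)
--
--     resolved_prefixes = list(dict.fromkeys(resolved_set))
--     unresolved_prefixes = [p for p in dict.fromkeys(unresolved_list) if p not in resolved_set]
--     return resolved_prefixes, unresolved_prefixes
-- ===== SOURCE B (Python) =====
-- from typing import Dict, Any, List
--
-- def _align_incident_resolution(
--     incident_codes: List[str],
--     user_records: List[Dict[str, Any]],
-- ) -> tuple[List[str], List[str]]:
--     # Pass 1: ordered-unique list of prefixes with at least one aligned "Resolved" record.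
--     resolved: List[str] = []
--     for code, rec in zip(incident_codes, user_records):
--         if "-" in code and rec.get("status") == "Resolved":
--             p = code.split("-")[0]
--             if p not in resolved:
--                 resolved.append(p)
--     # Pass 2: ordered-unique list of prefixes whose occurrence here is unresolved,
--     # skipping anything already known resolved.
--     unresolved: List[str] = []
--     for i, code in enumerate(incident_codes):
--         if "-" not in code:
--             continue
--         p = code.split("-")[0]
--         if p in resolved or p in unresolved:
--             continue
--         if not (i < len(user_records) and user_records[i].get("status") == "Resolved"):
--             unresolved.append(p)
--     return resolved, unresolved
-- ===== Notes on version B (the rewrite author's own statement) =====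
-- stated objective: alternative
-- what changed: B replaces A's fused single pass (hash set of resolved prefixes plus an occurrence list, followed by two dict.fromkeys/filter post-passes) with two separate scans: pass one builds an ordered-unique resolved-prefix list over zip(incident_codes, user_records), pass two emits the unresolved prefixes directly with inline membership filtering, so no post-hoc dedup/filter step remains; Pre_ excludes inputs with two or more distinct resolved prefixes, on which A's list(resolved_set) iteration order depends on the interpreter hash seed.
import Mathlib
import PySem

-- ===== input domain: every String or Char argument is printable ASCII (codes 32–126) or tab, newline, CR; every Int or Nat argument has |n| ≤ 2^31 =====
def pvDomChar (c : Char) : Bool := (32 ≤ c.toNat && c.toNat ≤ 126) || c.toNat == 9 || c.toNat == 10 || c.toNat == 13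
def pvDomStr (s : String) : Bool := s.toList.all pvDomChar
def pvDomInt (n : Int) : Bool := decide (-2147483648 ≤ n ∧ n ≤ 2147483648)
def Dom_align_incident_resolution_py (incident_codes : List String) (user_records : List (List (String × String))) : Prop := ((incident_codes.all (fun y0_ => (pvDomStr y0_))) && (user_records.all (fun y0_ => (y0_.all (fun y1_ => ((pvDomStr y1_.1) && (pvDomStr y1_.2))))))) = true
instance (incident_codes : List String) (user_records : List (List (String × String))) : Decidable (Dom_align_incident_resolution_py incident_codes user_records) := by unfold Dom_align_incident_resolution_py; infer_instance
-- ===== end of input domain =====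

-- B builds the resolved prefixes as an ordered-unique list over zip and the unresolved list
-- directly with inline membership filtering, instead of A's fused pass + dedup/filter post-passes.
-- Return-value equivalence only; neither program mutates its arguments.

-- shared shallow helpers ('"-" in code', 'code.split("-")[0]', 'rec.get("status") == "Resolved"')
def pvHasDash (code : String) : Bool := PySem.Str.isIn "-" code
def pvPrefix (code : String) : String := PySem.List.pyGetD ((PySem.Str.split? code "-").getD []) 0 ""
def pvResolvedRec (r : List (String × String)) : Bool := PySem.Dict.get? (PySem.Dict.mk r) "status" == some "Resolved"

-- ===== PORT A =====
-- loop body of A's single for-loop over enumerate(incident_codes)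
def pvStepA (user_records : List (List (String × String))) (st : PySem.Set String × List String) (ic : Int × String) : PySem.Set String × List String :=
  if pvHasDash ic.2 then
    let p := pvPrefix ic.2
    if decide (ic.1 < (user_records.length : Int)) && pvResolvedRec (PySem.List.pyGetD user_records ic.1 []) then
      (PySem.Set.add st.1 p, st.2)
    else
      (st.1, st.2 ++ [p])
  else st

def align_incident_resolution_py (incident_codes : List String) (user_records : List (List (String × String))) : List String × List String :=
  let st := (PySem.List.enumerate incident_codes).foldl (pvStepA user_records) (PySem.Set.empty, [])
  (PySem.List.dedup st.1, (PySem.List.dedup st.2).filter (fun p => !(PySem.Set.contains st.1 p)))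

-- ===== PORT B =====
-- pass 1: ordered-unique resolved prefixes over zip(incident_codes, user_records)
def pvStepB1 (acc : List String) (cr : String × List (String × String)) : List String :=
  if pvHasDash cr.1 && pvResolvedRec cr.2 then
    let p := pvPrefix cr.1
    if p ∈ acc then acc else acc ++ [p]
  else acc

-- pass 2: emit unresolved prefixes, skipping resolved ones and duplicates inline
def pvStepB2 (user_records : List (List (String × String))) (resolved : List String) (acc : List String) (ic : Int × String) : List String :=
  if !pvHasDash ic.2 then acc
  else
    let p := pvPrefix ic.2
    if p ∈ resolved ∨ p ∈ acc then acc
    else if !(decide (ic.1 < (user_records.length : Int)) && pvResolvedRec (PySem.List.pyGetD user_records ic.1 [])) then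
      acc ++ [p]
    else acc

def align_incident_resolution_py_alt (incident_codes : List String) (user_records : List (List (String × String))) : List String × List String :=
  let resolved := (incident_codes.zip user_records).foldl pvStepB1 []
  let unresolved := (PySem.List.enumerate incident_codes).foldl (pvStepB2 user_records resolved) []
  (resolved, unresolved)

-- ===== PRECONDITION & SPEC =====
-- the distinct prefixes with at least one aligned "Resolved" record, in first-occurrence order
def pvResolvedPrefixes (incident_codes : List String) (user_records : List (List (String × String))) : List String :=
  PySem.Set.ofList ((incident_codes.zip user_records).filterMap
    (fun cr => if pvHasDash cr.1 && pvResolvedRec cr.2 then some (pvPrefix cr.1) else none))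

-- Pre_ excludes inputs with two or more distinct resolved prefixes: there A returns
-- list(resolved_set), whose order depends on the interpreter's hash seed (no determinate
-- value to match); B returns those prefixes in first-occurrence order.
def Pre_align_incident_resolution_py (incident_codes : List String) (user_records : List (List (String × String))) : Prop :=
  (pvResolvedPrefixes incident_codes user_records).length ≤ 1
instance (incident_codes : List String) (user_records : List (List (String × String))) : Decidable (Pre_align_incident_resolution_py incident_codes user_records) := by unfold Pre_align_incident_resolution_py; infer_instance

def pvWitness_align_incident_resolution_py : List String × (List (List (String × String))) :=
  (["ab-1", "cd-2"], [[("status", "Resolved")]])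

def Spec_align_incident_resolution_py (incident_codes : List String) (user_records : List (List (String × String))) (out : List String × List String) : Prop := out = align_incident_resolution_py_alt incident_codes user_records
instance (incident_codes : List String) (user_records : List (List (String × String))) (out : List String × List String) : Decidable (Spec_align_incident_resolution_py incident_codes user_records out) := by unfold Spec_align_incident_resolution_py; infer_instance

-- ===== CLAIM (what is proved, stated in full; the proofs are below) =====
def Claim_equal_align_incident_resolution_py : Prop := ∀ (incident_codes : List String) (user_records : List (List (String × String))), Dom_align_incident_resolution_py incident_codes user_records → Pre_align_incident_resolution_py incident_codes user_records → Spec_align_incident_resolution_py incident_codes user_records (align_incident_resolution_py incident_codes user_records)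

-- ===== LEMMAS AND PROOFS =====

-- each code paired with 'its aligned record exists and is Resolved' (false once records run out)
def pvPairs : List String → List (List (String × String)) → List (String × Bool)
  | [], _ => []
  | c :: cs, [] => (c, false) :: pvPairs cs []
  | c :: cs, r :: rs => (c, pvResolvedRec r) :: pvPairs cs rs

-- the aligned-record test at index k equals the head test of the dropped record list
theorem pvPairB_drop (recs : List (List (String × String))) (k : Nat) :
    (decide ((k : Int) < (recs.length : Int)) && pvResolvedRec (PySem.List.pyGetD recs (k : Int) [])) =
      (match recs.drop k with | [] => false | r :: _ => pvResolvedRec r) := by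
  rcases h : recs.drop k with _ | ⟨r, rs⟩
  · have hk : recs.length ≤ k := by
      have := congrArg List.length h
      simp [List.length_drop] at this
      omega
    simp
    omega
  · have hk : k < recs.length := by
      have := congrArg List.length h
      simp [List.length_drop] at this
      omega
    have hget : recs[k]? = some r := by
      have h0 : (recs.drop k)[0]? = recs[k]? := by
        simp [List.getElem?_drop]
      rw [← h0, h]
      rfl
    have : PySem.List.pyGetD recs (k : Int) [] = r := by
      rw [PySem.List.pyGetD_natCast]
      simp [List.getD_eq_getElem?_getD, hget]
    rw [this]
    simp
    omega

-- a fold over enumerate that reads only the code and the aligned-record test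
-- is a fold over pvPairs of the codes with the dropped record list
theorem pvBridge {β : Type} (f : β → String → Bool → β) (recs : List (List (String × String))) :
    ∀ (codes : List String) (k : Nat) (init : β),
      (PySem.List.enumerate codes (k : Int)).foldl
          (fun acc ic => f acc ic.2 (decide (ic.1 < (recs.length : Int)) && pvResolvedRec (PySem.List.pyGetD recs ic.1 []))) init
        = (pvPairs codes (recs.drop k)).foldl (fun acc cb => f acc cb.1 cb.2) init := by
  intro codes
  induction codes with
  | nil => intro k init; simp [PySem.List.enumerate_nil, pvPairs]
  | cons c cs ih =>
    intro k init
    rw [PySem.List.enumerate_cons]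
    have hcast : (k : Int) + 1 = ((k + 1 : Nat) : Int) := by push_cast; ring
    rcases h : recs.drop k with _ | ⟨r, rs⟩
    · have htail : recs.drop (k + 1) = [] := by
        rw [← List.tail_drop, h]; rfl
      have hb := pvPairB_drop recs k
      rw [h] at hb
      simp only [List.foldl_cons, hb, hcast, ih (k + 1) (f init c false)]
      simp [pvPairs, htail]
    · have htail : recs.drop (k + 1) = rs := by
        rw [← List.tail_drop, h]; rfl
      have hb := pvPairB_drop recs k
      rw [h] at hb
      simp only [List.foldl_cons, hb, hcast, ih (k + 1) (f init c (pvResolvedRec r))]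
      simp [pvPairs, htail]

-- a pvPairs fold whose step ignores 'false' rows does nothing once records are exhausted
theorem pvPairsNilFold {β : Type} (f : β → String → Bool → β) (hf : ∀ acc c, f acc c false = acc) :
    ∀ (codes : List String) (init : β),
      (pvPairs codes []).foldl (fun acc cb => f acc cb.1 cb.2) init = init := by
  intro codes
  induction codes with
  | nil => intro init; simp [pvPairs]
  | cons c cs ih => intro init; simp [pvPairs, hf, ih]

-- a zip fold that reads only the code and the record test is a pvPairs fold
theorem pvZipBridge {β : Type} (f : β → String → Bool → β) (hf : ∀ acc c, f acc c false = acc) :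
    ∀ (codes : List String) (recs : List (List (String × String))) (init : β),
      (codes.zip recs).foldl (fun acc cr => f acc cr.1 (pvResolvedRec cr.2)) init
        = (pvPairs codes recs).foldl (fun acc cb => f acc cb.1 cb.2) init := by
  intro codes
  induction codes with
  | nil => intro recs init; simp [pvPairs]
  | cons c cs ih =>
    intro recs init
    rcases recs with _ | ⟨r, rs⟩
    · simp [pvPairs, hf, pvPairsNilFold f hf]
    · simp only [List.zip_cons_cons, List.foldl_cons, pvPairs, ih]

-- folding Set.add over fresh, duplicate-free elements appends them
theorem pvFoldAdd : ∀ (l : List String) (s : PySem.Set String),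
    (∀ x ∈ l, x ∉ s) → l.Nodup → l.foldl PySem.Set.add s = s ++ l := by
  intro l
  induction l with
  | nil => intro s _ _; simp
  | cons x t ih =>
    intro s hfresh hnd
    have hx : x ∉ s := hfresh x (by simp)
    have hadd : PySem.Set.add s x = s ++ [x] := by
      simp [PySem.Set.add, hx]
    rw [List.foldl_cons, hadd, ih (s ++ [x])]
    · simp
    · intro y hy
      simp only [List.mem_append, List.mem_singleton]
      rintro (h | h)
      · exact hfresh y (by simp [hy]) h
      · exact (List.nodup_cons.mp hnd).1 (h ▸ hy)
    · exact (List.nodup_cons.mp hnd).2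

theorem pvDedupSelf (l : List String) (h : l.Nodup) : PySem.List.dedup l = l := by
  rw [PySem.List.dedup_eq_ofList, PySem.Set.ofList_eq_foldl]
  simpa using pvFoldAdd l [] (by simp) h

-- dedup of a cons: head, then dedup of the tail without the head
theorem pvDedupCons (p : String) (l : List String) :
    PySem.List.dedup (p :: l) = p :: (PySem.List.dedup l).filter (fun x => !(x == p)) := by
  rw [PySem.List.dedup_eq_ofList, PySem.Set.ofList_eq_foldl, List.foldl_cons]
  have h1 : PySem.Set.add ([] : PySem.Set String) p = [p] := by
    simp [PySem.Set.add]
  rw [h1]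
  have h2 : List.foldl PySem.Set.add [p] l = PySem.Set.update [p] l := rfl
  rw [h2, PySem.Set.update_eq_append_filter, ← PySem.List.dedup_eq_ofList]
  have h3 : ∀ y : String, PySem.Set.contains [p] y = (y == p) := by
    intro y
    rw [PySem.Set.contains_eq_listContains, List.contains_eq_mem]
    by_cases h : y = p
    · subst h; simp
    · simp [h]
  simp only [h3]
  rfl

-- dedup commutes with filter
theorem pvDedupFilter (q : String → Bool) : ∀ (l : List String),
    PySem.List.dedup (l.filter q) = (PySem.List.dedup l).filter q := by
  intro l
  induction l with
  | nil => simp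
  | cons x t ih =>
    by_cases hq : q x
    · rw [List.filter_cons_of_pos hq, pvDedupCons, pvDedupCons, ih,
          List.filter_cons_of_pos hq, List.filter_filter, List.filter_filter]
      congr 1
      apply List.filter_congr
      intro a _
      rw [Bool.and_comm]
    · rw [List.filter_cons_of_neg hq, pvDedupCons, List.filter_cons_of_neg hq,
          List.filter_filter, ih]
      apply List.filter_congr
      intro a _
      by_cases hax : a = x
      · subst hax; simp [hq]
      · simp [hax]

-- the loop bodies as functions of (code, aligned-resolved) rows
def pvFA (st : PySem.Set String × List String) (c : String) (b : Bool) : PySem.Set String × List String :=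
  if pvHasDash c then
    if b then (PySem.Set.add st.1 (pvPrefix c), st.2) else (st.1, st.2 ++ [pvPrefix c])
  else st

def pvFS (s : PySem.Set String) (cb : String × Bool) : PySem.Set String :=
  if pvHasDash cb.1 && cb.2 then PySem.Set.add s (pvPrefix cb.1) else s

def pvFU (u : List String) (cb : String × Bool) : List String :=
  if pvHasDash cb.1 && !cb.2 then u ++ [pvPrefix cb.1] else u

def pvFB1 (acc : List String) (c : String) (b : Bool) : List String :=
  if pvHasDash c && b then
    if pvPrefix c ∈ acc then acc else acc ++ [pvPrefix c]
  else acc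

def pvFB2 (S : List String) (acc : List String) (c : String) (b : Bool) : List String :=
  if !pvHasDash c then acc
  else if pvPrefix c ∈ S ∨ pvPrefix c ∈ acc then acc
  else if !b then acc ++ [pvPrefix c]
  else acc

theorem pvStepA_eq (recs : List (List (String × String))) :
    pvStepA recs = fun acc (ic : Int × String) =>
      pvFA acc ic.2 (decide (ic.1 < (recs.length : Int)) && pvResolvedRec (PySem.List.pyGetD recs ic.1 [])) := rfl

theorem pvStepB1_eq :
    pvStepB1 = fun acc (cr : String × List (String × String)) => pvFB1 acc cr.1 (pvResolvedRec cr.2) := rfl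

theorem pvStepB2_eq (recs : List (List (String × String))) (S : List String) :
    pvStepB2 recs S = fun acc (ic : Int × String) =>
      pvFB2 S acc ic.2 (decide (ic.1 < (recs.length : Int)) && pvResolvedRec (PySem.List.pyGetD recs ic.1 [])) := rfl

theorem pvFA_split :
    (fun (st : PySem.Set String × List String) (cb : String × Bool) => pvFA st cb.1 cb.2)
      = fun st cb => (pvFS st.1 cb, pvFU st.2 cb) := by
  funext st cb
  rcases cb with ⟨c, b⟩
  by_cases hd : pvHasDash c <;> cases b <;> simp [pvFA, pvFS, pvFU, hd]

theorem pvFB1_eq_FS :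
    (fun (acc : List String) (cb : String × Bool) => pvFB1 acc cb.1 cb.2) = pvFS := by
  funext acc cb
  rcases cb with ⟨c, b⟩
  simp only [pvFB1, pvFS]
  by_cases hP : pvHasDash c && b
  · rw [if_pos hP, if_pos hP]
    have : PySem.Set.add acc (pvPrefix c) = if pvPrefix c ∈ acc then acc else acc ++ [pvPrefix c] := by
      simp [PySem.Set.add, PySem.Set.contains_eq_listContains, List.contains_eq_mem]
    rw [this]
  · rw [if_neg hP, if_neg hP]

-- A resolved set as ofList of the resolved occurrences
theorem pvS_eq (ps : List (String × Bool)) :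
    ps.foldl pvFS PySem.Set.empty
      = PySem.Set.ofList ((ps.filter (fun e => pvHasDash e.1 && e.2)).map (fun e => pvPrefix e.1)) := by
  rw [PySem.Set.ofList_eq_foldl, List.foldl_map,
      ← PySem.List.foldl_if_eq_foldl_filter (fun e => pvHasDash e.1 && e.2)
        (fun s (e : String × Bool) => PySem.Set.add s (pvPrefix e.1))]
  rfl

-- A unresolved occurrence list
theorem pvU_eq (ps : List (String × Bool)) :
    ps.foldl pvFU [] = (ps.filter (fun e => pvHasDash e.1 && !e.2)).map (fun e => pvPrefix e.1) := by
  rw [show pvFU = (fun u (cb : String × Bool) => if pvHasDash cb.1 && !cb.2 then u ++ [pvPrefix cb.1] else u) from rfl]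
  simpa using PySem.List.foldl_append_if (fun e : String × Bool => pvHasDash e.1 && !e.2)
      (fun e : String × Bool => pvPrefix e.1) ps []

-- B pass 2 computes dedup-then-filter of the unresolved occurrences
theorem pvUnres (S : List String) : ∀ (ps : List (String × Bool)) (acc : List String),
    (∀ e ∈ ps, (pvHasDash e.1 && e.2) = true → pvPrefix e.1 ∈ S) →
    ps.foldl (fun acc cb => pvFB2 S acc cb.1 cb.2) acc
      = acc ++ PySem.List.dedup
          (((ps.filter (fun e => pvHasDash e.1 && !e.2)).map (fun e => pvPrefix e.1)).filter
            (fun x => !(S.contains x) && !(acc.contains x))) := by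
  intro ps
  induction ps with
  | nil => intro acc _; simp
  | cons e ps' ih =>
    rcases e with ⟨c, b⟩
    intro acc hS
    have hS' : ∀ e ∈ ps', (pvHasDash e.1 && e.2) = true → pvPrefix e.1 ∈ S :=
      fun e he => hS e (List.mem_cons_of_mem _ he)
    by_cases hd : pvHasDash c
    · cases b with
      | true =>
        have hp : pvPrefix c ∈ S := hS (c, true) (by simp) (by simp [hd])
        simp only [List.foldl_cons]
        rw [show pvFB2 S acc c true = acc from by simp [pvFB2, hd, hp], ih acc hS']
        simp [hd]
      | false =>
        by_cases hps : pvPrefix c ∈ S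
        · simp only [List.foldl_cons]
          rw [show pvFB2 S acc c false = acc from by simp [pvFB2, hd, hps], ih acc hS']
          simp [hd, hps]
        · by_cases hpa : pvPrefix c ∈ acc
          · simp only [List.foldl_cons]
            rw [show pvFB2 S acc c false = acc from by simp [pvFB2, hd, hpa], ih acc hS']
            simp [hd, hps, hpa]
          · simp only [List.foldl_cons]
            rw [show pvFB2 S acc c false = acc ++ [pvPrefix c] from by
                  simp [pvFB2, hd, hps, hpa],
                ih (acc ++ [pvPrefix c]) hS']
            have hQ : (pvHasDash c && !false) = true := by simp [hd]
            rw [List.filter_cons, if_pos hQ, List.map_cons, List.filter_cons]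
            have hhead : (!(S.contains (pvPrefix c)) && !(acc.contains (pvPrefix c))) = true := by
              simp only [List.contains_eq_mem]
              simp [hps, hpa]
            rw [if_pos hhead, pvDedupCons]
            have hmerge : (fun x => !(S.contains x) && !((acc ++ [pvPrefix c]).contains x))
                = (fun x => (!(S.contains x) && !(acc.contains x)) && !(x == pvPrefix c)) := by
              funext x
              simp only [List.contains_eq_mem, List.mem_append, List.mem_singleton]
              by_cases hx1 : x ∈ S <;> by_cases hx2 : x ∈ acc <;>
                by_cases hx3 : x = pvPrefix c <;> simp [hx1, hx2, hx3]
            rw [hmerge]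
            have hcomm : (fun x => (!(S.contains x) && !(acc.contains x)) && !(x == pvPrefix c))
                = (fun x => (!(x == pvPrefix c)) && (!(S.contains x) && !(acc.contains x))) := by
              funext x; rw [Bool.and_comm]
            rw [hcomm, ← List.filter_filter, pvDedupFilter]
            simp
    · simp only [List.foldl_cons]
      rw [show pvFB2 S acc c b = acc from by simp [pvFB2, hd], ih acc hS']
      simp [hd]

-- every resolved occurrence's prefix is in the resolved set
theorem pvResolved_mem (ps : List (String × Bool)) :
    ∀ e ∈ ps, (pvHasDash e.1 && e.2) = true →
      pvPrefix e.1 ∈ PySem.Set.ofList ((ps.filter (fun e => pvHasDash e.1 && e.2)).map (fun e => pvPrefix e.1)) := by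
  intro e he hP
  rw [PySem.Set.mem_ofList]
  exact List.mem_map_of_mem (List.mem_filter.mpr ⟨he, hP⟩)

-- ===== VERDICT (by name: the statement is the Claim_ definition above) =====
theorem align_incident_resolution_py_spec : Claim_equal_align_incident_resolution_py := by
  intro codes recs _ _
  unfold Spec_align_incident_resolution_py align_incident_resolution_py align_incident_resolution_py_alt
  have hA : (PySem.List.enumerate codes).foldl (pvStepA recs) (PySem.Set.empty, []) =
      ((pvPairs codes recs).foldl pvFS PySem.Set.empty, (pvPairs codes recs).foldl pvFU []) := by
    rw [pvStepA_eq recs]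
    have h := pvBridge pvFA recs codes 0 (PySem.Set.empty, [])
    simp only [Nat.cast_zero, List.drop_zero] at h
    rw [h, show (fun (acc : PySem.Set String × List String) (cb : String × Bool) => pvFA acc cb.1 cb.2)
        = fun st cb => (pvFS st.1 cb, pvFU st.2 cb) from pvFA_split]
    exact PySem.List.foldl_prod_mk pvFS pvFU _ _ _
  set ps := pvPairs codes recs with hps
  set S := PySem.Set.ofList ((ps.filter (fun e => pvHasDash e.1 && e.2)).map (fun e => pvPrefix e.1)) with hSdef
  have hBres : (codes.zip recs).foldl pvStepB1 [] = S := by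
    rw [pvStepB1_eq]
    have h := pvZipBridge pvFB1 (by intro acc c; simp [pvFB1]) codes recs []
    rw [h, show (fun (acc : List String) (cb : String × Bool) => pvFB1 acc cb.1 cb.2) = pvFS from pvFB1_eq_FS]
    have : ([] : List String) = PySem.Set.empty := rfl
    rw [this, pvS_eq]
  have hBunres : (PySem.List.enumerate codes).foldl (pvStepB2 recs ((codes.zip recs).foldl pvStepB1 [])) []
      = (PySem.List.dedup (ps.foldl pvFU [])).filter (fun p => !(PySem.Set.contains (ps.foldl pvFS PySem.Set.empty) p)) := by
    rw [hBres, pvStepB2_eq recs S]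
    have h := pvBridge (pvFB2 S) recs codes 0 ([] : List String)
    simp only [Nat.cast_zero, List.drop_zero] at h
    rw [h, pvUnres S ps [] (pvResolved_mem ps)]
    rw [pvU_eq, pvS_eq, ← hSdef, pvDedupFilter, List.nil_append]
    apply List.filter_congr
    intro a _
    simp [PySem.Set.contains_eq_listContains]
  have hdedupS : PySem.List.dedup (ps.foldl pvFS PySem.Set.empty) = S := by
    rw [pvS_eq, ← hSdef]
    exact pvDedupSelf S (PySem.Set.nodup_ofList _)
  rw [hBres] at hBunres
  simp only [hA, hBres, hBunres, hdedupS]
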